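-- pv_equiv track=rewrite | github.com/t1ooo/geeksforgeeks | length-largest-subarray-contiguous-elements-set-1/main.py | largestSubarrayLengthV3
-- ===== SOURCE A (Python) =====
-- def largestSubarrayLengthV3(arr):
--     n = len(arr)
--
--     max_len = 1
--     for i in range(n):
--         mini = arr[i]
--         maxi = arr[i]
--
--         for k in range(i + 1, n):
--             mini = min(mini, arr[k])
--             maxi = max(maxi, arr[k])
--
--             if maxi - mini == k - i:
--                 max_len = max(max_len, maxi - mini + 1)
--
--     return max_len
-- ===== SOURCE B (Python) =====
-- def largestSubarrayLengthV3(arr):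
--     n = len(arr)
--
--     max_len = 1
--     for i in range(n):
--         for k in range(i + 1, n):
--             w = arr[i:k + 1]
--             if max(w) - min(w) == k - i:
--                 max_len = max(max_len, k - i + 1)
--
--     return max_len
-- ===== Notes on version B (the rewrite author's own statement) =====
-- stated objective: simpler
-- what changed: Replaces the incremental mini/maxi state maintained across the inner loop with a stateless per-window recomputation: each (i,k) window is a slice whose extremes are taken with built-in max/min, and the length update uses k-i+1 directly.
import Mathlib
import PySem

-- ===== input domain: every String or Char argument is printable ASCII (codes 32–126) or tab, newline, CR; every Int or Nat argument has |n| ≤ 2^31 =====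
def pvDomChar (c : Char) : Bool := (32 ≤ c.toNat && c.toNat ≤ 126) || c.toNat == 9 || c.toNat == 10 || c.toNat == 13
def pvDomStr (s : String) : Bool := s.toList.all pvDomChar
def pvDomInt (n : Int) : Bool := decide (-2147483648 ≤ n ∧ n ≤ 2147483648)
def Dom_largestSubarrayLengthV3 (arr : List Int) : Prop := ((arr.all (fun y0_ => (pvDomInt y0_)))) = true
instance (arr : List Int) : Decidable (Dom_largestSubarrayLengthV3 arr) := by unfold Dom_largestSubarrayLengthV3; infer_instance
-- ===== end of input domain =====

-- B replaces A's incremental mini/maxi loop state with a stateless per-window recomputation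
-- (slice + built-in max/min); simpler body, same return value (B is asymptotically slower, not faster).


-- ===== PORT A =====
def largestSubarrayLengthV3 (arr : List Int) : Int :=
  (PySem.List.pyRange 0 (arr.length : Int) 1).foldl
    (fun max_len i =>
      let a := PySem.List.pyGetD arr i 0
      ((PySem.List.pyRange (i + 1) (arr.length : Int) 1).foldl
        (fun (s : Int × Int × Int) k =>
          let mini := min s.1 (PySem.List.pyGetD arr k 0)
          let maxi := max s.2.1 (PySem.List.pyGetD arr k 0)
          (mini, maxi, if maxi - mini = k - i then max s.2.2 (maxi - mini + 1) else s.2.2))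
        (a, a, max_len)).2.2)
    1

-- ===== PORT B =====
def largestSubarrayLengthV3_alt (arr : List Int) : Int :=
  (PySem.List.pyRange 0 (arr.length : Int) 1).foldl
    (fun max_len i =>
      (PySem.List.pyRange (i + 1) (arr.length : Int) 1).foldl
        (fun ml k =>
          let w := PySem.List.slice arr (some i) (some (k + 1))
          if (PySem.List.max? w (fun x => x)).getD 0 - (PySem.List.min? w (fun x => x)).getD 0 = k - i
          then max ml (k - i + 1) else ml)
        max_len)
    1

-- ===== PRECONDITION & SPEC =====
def Spec_largestSubarrayLengthV3 (arr : List Int) (out : Int) : Prop := out = largestSubarrayLengthV3_alt arr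
instance (arr : List Int) (out : Int) : Decidable (Spec_largestSubarrayLengthV3 arr out) := by unfold Spec_largestSubarrayLengthV3; infer_instance

-- ===== CLAIM (what is proved, stated in full; the proofs are below) =====
def Claim_equal_largestSubarrayLengthV3 : Prop := ∀ (arr : List Int), Dom_largestSubarrayLengthV3 arr → Spec_largestSubarrayLengthV3 arr (largestSubarrayLengthV3 arr)

-- ===== LEMMAS AND PROOFS =====

-- min/max (no key) of a list extended on the right
theorem minD_snoc (xs : List Int) (y : Int) (h : xs ≠ []) :
    (PySem.List.min? (xs ++ [y]) (fun x => x)).getD 0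
      = min ((PySem.List.min? xs (fun x => x)).getD 0) y := by
  obtain ⟨x, t, rfl⟩ := List.exists_cons_of_ne_nil h
  rw [List.cons_append, PySem.List.min?_id_cons, PySem.List.min?_id_cons]
  simp [List.foldl_append]

theorem maxD_snoc (xs : List Int) (y : Int) (h : xs ≠ []) :
    (PySem.List.max? (xs ++ [y]) (fun x => x)).getD 0
      = max ((PySem.List.max? xs (fun x => x)).getD 0) y := by
  obtain ⟨x, t, rfl⟩ := List.exists_cons_of_ne_nil h
  rw [List.cons_append, PySem.List.max?_id_cons, PySem.List.max?_id_cons]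
  simp [List.foldl_append]

-- arr[i:i+1] = [arr[i]]
theorem slice_singleton (arr : List Int) (i : Int) (h0 : 0 ≤ i) (h : i < (arr.length : Int)) :
    PySem.List.slice arr (some i) (some (i + 1)) = [PySem.List.pyGetD arr i 0] := by
  rw [PySem.List.slice_toNat arr h0 (by omega)]
  have hp : i.toNat < arr.length := by omega
  have h1 : (i + 1).toNat - i.toNat = 1 := by omega
  rw [h1, List.take_one, List.head?_drop, List.getElem?_eq_getElem hp,
    PySem.List.pyGetD_eq_getElem arr 0 h0 h]
  simp

-- arr[i:j+1] = arr[i:j] ++ [arr[j]]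
theorem slice_snoc (arr : List Int) (i j : Int) (h0 : 0 ≤ i) (hij : i ≤ j)
    (hj : j < (arr.length : Int)) :
    PySem.List.slice arr (some i) (some (j + 1))
      = PySem.List.slice arr (some i) (some j) ++ [PySem.List.pyGetD arr j 0] := by
  rw [PySem.List.slice_toNat arr h0 (by omega), PySem.List.slice_toNat arr h0 (by omega)]
  have hq : j.toNat < arr.length := by omega
  have h1 : (j + 1).toNat - i.toNat = (j.toNat - i.toNat) + 1 := by omega
  rw [h1, List.take_add_one, List.getElem?_drop]
  have h2 : i.toNat + (j.toNat - i.toNat) = j.toNat := by omega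
  rw [h2, List.getElem?_eq_getElem hq, PySem.List.pyGetD_eq_getElem arr 0 (by omega) hj]
  simp

theorem slice_ne_nil (arr : List Int) (i j : Int) (h0 : 0 ≤ i) (hij : i < j)
    (hj : j ≤ (arr.length : Int)) :
    PySem.List.slice arr (some i) (some j) ≠ [] := by
  rw [PySem.List.slice_toNat arr h0 (by omega)]
  intro hnil
  have := congrArg List.length hnil
  simp at this
  omega

-- the inner-loop invariant: A's running (mini, maxi, max_len) state equals
-- (min of window, max of window, B's inner fold)
theorem inner_inv (arr : List Int) (i : Int) (h0 : 0 ≤ i) (hin : i < (arr.length : Int)) :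
    ∀ j : Int, i + 1 ≤ j → j ≤ (arr.length : Int) → ∀ ml : Int,
      (PySem.List.pyRange (i + 1) j 1).foldl
        (fun (s : Int × Int × Int) k =>
          let mini := min s.1 (PySem.List.pyGetD arr k 0)
          let maxi := max s.2.1 (PySem.List.pyGetD arr k 0)
          (mini, maxi, if maxi - mini = k - i then max s.2.2 (maxi - mini + 1) else s.2.2))
        (PySem.List.pyGetD arr i 0, PySem.List.pyGetD arr i 0, ml)
      = ((PySem.List.min? (PySem.List.slice arr (some i) (some j)) (fun x => x)).getD 0,
         (PySem.List.max? (PySem.List.slice arr (some i) (some j)) (fun x => x)).getD 0,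
         (PySem.List.pyRange (i + 1) j 1).foldl
           (fun ml k =>
             let w := PySem.List.slice arr (some i) (some (k + 1))
             if (PySem.List.max? w (fun x => x)).getD 0 - (PySem.List.min? w (fun x => x)).getD 0 = k - i
             then max ml (k - i + 1) else ml)
           ml) := by
  intro j hj1
  induction j, hj1 using Int.le_induction with
  | base =>
    intro _ ml
    rw [PySem.List.pyRange_one_eq_nil (by omega), slice_singleton arr i h0 hin]
    simp [PySem.List.min?_id_cons, PySem.List.max?_id_cons]
  | succ j hj ih =>
    intro hjn ml
    have hjn' : j < (arr.length : Int) := by omega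
    rw [PySem.List.pyRange_one_succ_right (by omega), List.foldl_append, List.foldl_append,
      ih (by omega) ml]
    have hne := slice_ne_nil arr i j h0 (by omega) (by omega)
    simp only [List.foldl_cons, List.foldl_nil]
    rw [slice_snoc arr i j h0 (by omega) hjn']
    rw [minD_snoc _ _ hne, maxD_snoc _ _ hne]
    split_ifs with h1
    · have : max ((PySem.List.max? (PySem.List.slice arr (some i) (some j)) (fun x => x)).getD 0)
          (PySem.List.pyGetD arr j 0)
        - min ((PySem.List.min? (PySem.List.slice arr (some i) (some j)) (fun x => x)).getD 0)
          (PySem.List.pyGetD arr j 0) + 1 = j - i + 1 := by omega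
      rw [this]
    · rfl

-- ===== VERDICT (by name: the statement is the Claim_ definition above) =====
theorem largestSubarrayLengthV3_spec : Claim_equal_largestSubarrayLengthV3 := by
  intro arr _
  unfold Spec_largestSubarrayLengthV3 largestSubarrayLengthV3 largestSubarrayLengthV3_alt
  refine PySem.List.foldl_congr_mem _ _ _ _ ?_
  intro ml i hi
  rw [PySem.List.mem_pyRange_one] at hi
  simp only
  rw [inner_inv arr i hi.1 hi.2 (arr.length : Int) (by omega) (le_refl _) ml]
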